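-- pv_equiv track=rewrite | github.com/enegalan/cli-tamagotchi | src/cli_tamagotchi/sprites/ascii.py | _normalize_sprite_frames
-- ===== SOURCE A (Python) =====
-- def _normalize_sprite_frames(raw_frames: list[list[str]]) -> list[list[str]]:
--     if not raw_frames:
--         return raw_frames
--     max_height = max(len(frame) for frame in raw_frames)
--     max_widths = [0] * max_height
--     for frame in raw_frames:
--         for row_index, line in enumerate(frame):
--             max_widths[row_index] = max(max_widths[row_index], len(line))
--     normalized: list[list[str]] = []
--     for frame in raw_frames:
--         padded_lines: list[str] = []
--         for row_index in range(max_height):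
--             line = frame[row_index] if row_index < len(frame) else ""
--             padded_lines.append(line.ljust(max_widths[row_index]))
--         normalized.append(padded_lines)
--     return normalized
-- ===== SOURCE B (Python) =====
-- def _normalize_sprite_frames(raw_frames: list[list[str]]) -> list[list[str]]:
--     if not raw_frames:
--         return raw_frames
--     height = max(len(frame) for frame in raw_frames)
--     # Build row-major: for each row index, gather that row across all frames,
--     # compute its width inline, and pad; then transpose back to frame-major.
--     rows = []
--     for i in range(height):
--         cells = [frame[i] if i < len(frame) else "" for frame in raw_frames]
--         w = max(len(c) for c in cells)
--         rows.append([c + " " * (w - len(c)) for c in cells])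
--     return [[rows[i][j] for i in range(height)] for j in range(len(raw_frames))]
-- ===== Notes on version B (the rewrite author's own statement) =====
-- stated objective: alternative
-- what changed: B builds the result row-major: one loop over row indices gathers each row across all frames, computes that row's width inline (no precomputed width array), pads it, and a final index-based transpose restores frame-major order.
import Mathlib
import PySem

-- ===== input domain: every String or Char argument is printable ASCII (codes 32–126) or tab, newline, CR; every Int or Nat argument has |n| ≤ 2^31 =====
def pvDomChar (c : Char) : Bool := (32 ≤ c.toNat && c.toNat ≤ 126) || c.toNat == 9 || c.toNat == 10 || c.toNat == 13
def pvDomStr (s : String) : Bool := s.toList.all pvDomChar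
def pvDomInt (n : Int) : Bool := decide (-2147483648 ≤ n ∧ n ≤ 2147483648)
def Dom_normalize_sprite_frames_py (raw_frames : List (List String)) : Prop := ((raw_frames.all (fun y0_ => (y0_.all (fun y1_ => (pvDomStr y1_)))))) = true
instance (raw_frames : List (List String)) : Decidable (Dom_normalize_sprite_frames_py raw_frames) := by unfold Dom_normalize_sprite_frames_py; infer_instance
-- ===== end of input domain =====

-- B builds the output ROW-MAJOR (outer loop over row indices, each row's width computed
-- inline from that row's cells, no precomputed width array) and transposes back at the
-- end; an alternative decomposition of the same cost.

-- str.ljust(w) with a space fill (exact: append spaces up to width w)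
def ljustPy (s : String) (w : Nat) : String :=
  String.ofList (s.toList ++ List.replicate (w - s.toList.length) ' ')

-- ===== PORT A =====
def normalize_sprite_frames_py (raw_frames : List (List String)) : List (List String) :=
  if raw_frames = [] then raw_frames
  else
    -- max(len(frame) for frame in raw_frames): builtin max of a nonempty sequence
    let max_height : Nat := ((raw_frames.map List.length).max?).getD 0
    -- max_widths = [0]*max_height, then in-place max updates (List.set = item assignment;
    -- getD is exact here since row_index < max_height always)
    let max_widths : List Nat := raw_frames.foldl (fun mw frame =>
        frame.zipIdx.foldl (fun mw p =>
          mw.set p.2 (Nat.max (mw.getD p.2 0) p.1.toList.length)) mw)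
      (List.replicate max_height 0)
    raw_frames.foldl (fun normalized frame =>
      normalized ++ [ (List.range max_height).foldl (fun padded_lines i =>
          padded_lines ++ [ljustPy (if i < frame.length then frame.getD i "" else "")
                                   (max_widths.getD i 0)] ) [] ]) []

-- ===== PORT B =====
def normalize_sprite_frames_py_alt (raw_frames : List (List String)) : List (List String) :=
  if raw_frames = [] then raw_frames
  else
    let height : Nat := ((raw_frames.map List.length).max?).getD 0
    -- row-major pass: each row gathered across frames, width computed inline, padded
    let rows : List (List String) := (List.range height).map (fun i =>
      let cells := raw_frames.map (fun f => if i < f.length then f.getD i "" else "")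
      let w : Nat := ((cells.map (fun c => c.toList.length)).max?).getD 0
      -- c + " " * (w - len(c))
      cells.map (fun c => String.ofList (c.toList ++ List.replicate (w - c.toList.length) ' ')))
    -- transpose back to frame-major: [[rows[i][j] for i in range(height)] for j in range(n)]
    (List.range raw_frames.length).map (fun j =>
      (List.range height).map (fun i => (rows.getD i []).getD j ""))

-- ===== PRECONDITION & SPEC =====
def Spec_normalize_sprite_frames_py (raw_frames : List (List String)) (out : List (List String)) : Prop := out = normalize_sprite_frames_py_alt raw_frames
instance (raw_frames : List (List String)) (out : List (List String)) : Decidable (Spec_normalize_sprite_frames_py raw_frames out) := by unfold Spec_normalize_sprite_frames_py; infer_instance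

-- ===== CLAIM (what is proved, stated in full; the proofs are below) =====
def Claim_equal_normalize_sprite_frames_py : Prop := ∀ (raw_frames : List (List String)), Dom_normalize_sprite_frames_py raw_frames → Spec_normalize_sprite_frames_py raw_frames (normalize_sprite_frames_py raw_frames)

-- ===== LEMMAS AND PROOFS =====

-- the common normal form both ports are proved equal to
def specW (fs : List (List String)) (i : Nat) : Nat :=
  fs.foldl (fun a f => Nat.max a (f.getD i "").toList.length) 0

def specOut (fs : List (List String)) : List (List String) :=
  fs.map (fun f =>
    (List.range (((fs.map List.length).max?).getD 0)).map
      (fun i => ljustPy (f.getD i "") (specW fs i)))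

-- foldl-append accumulator is map
theorem foldl_append_map {α β : Type} (g : α → β) (l : List α) (acc : List β) :
    l.foldl (fun a x => a ++ [g x]) acc = acc ++ l.map g := by
  induction l generalizing acc with
  | nil => simp
  | cons x xs ih => simp [List.foldl_cons, ih]

-- the index-guarded cell access is getD
theorem cell_eq (f : List String) (i : Nat) :
    (if i < f.length then f.getD i "" else "") = f.getD i "" := by
  by_cases h : i < f.length
  · simp [h]
  · simp [h]

-- A's inner width loop: length is preserved
theorem widths_inner_len (frame : List String) (k : Nat) (mw : List Nat) :
    ((frame.zipIdx k).foldl (fun mw p =>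
        mw.set p.2 (Nat.max (mw.getD p.2 0) p.1.toList.length)) mw).length = mw.length := by
  induction frame generalizing k mw with
  | nil => rfl
  | cons x xs ih =>
    rw [List.zipIdx_cons, List.foldl_cons, ih, List.length_set]

-- A's inner width loop, characterised pointwise
theorem widths_inner_getD (frame : List String) (i k : Nat) (mw : List Nat)
    (hlen : k + frame.length ≤ mw.length) :
    ((frame.zipIdx k).foldl (fun mw p =>
        mw.set p.2 (Nat.max (mw.getD p.2 0) p.1.toList.length)) mw).getD i 0 =
      if k ≤ i ∧ i < k + frame.length then
        Nat.max (mw.getD i 0) ((frame.getD (i - k) "").toList.length)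
      else mw.getD i 0 := by
  induction frame generalizing k mw with
  | nil => simp
  | cons x xs ih =>
    rw [List.zipIdx_cons, List.foldl_cons]
    rw [ih (k+1) _ (by rw [List.length_set]; simp only [List.length_cons] at hlen; omega)]
    have hk : k < mw.length := by simp at hlen; omega
    by_cases hik : i = k
    · subst hik
      have h1 : ¬ (i + 1 ≤ i ∧ i < i + 1 + xs.length) := by omega
      have h2 : i ≤ i ∧ i < i + (x :: xs).length := by simp only [List.length_cons]; omega
      rw [if_neg h1, if_pos h2]
      simp [List.getD, List.getElem?_set_self hk]
    · have hset : (mw.set k (Nat.max (mw.getD k 0) x.toList.length)).getD i 0 = mw.getD i 0 := by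
        simp [List.getD, List.getElem?_set_ne (by omega : k ≠ i)]
      rw [hset]
      by_cases hin : k + 1 ≤ i ∧ i < k + 1 + xs.length
      · rw [if_pos hin, if_pos (by simp only [List.length_cons]; omega)]
        have : (x :: xs).getD (i - k) "" = xs.getD (i - (k+1)) "" := by
          have h3 : i - k = (i - (k+1)) + 1 := by omega
          rw [h3]; simp [List.getD]
        rw [this]
      · rw [if_neg hin, if_neg (by simp only [List.length_cons, not_and, not_lt] at hin ⊢; omega)]

-- A's outer width loop equals the per-index max fold
theorem widths_outer (fs : List (List String)) (i : Nat) (mw : List Nat)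
    (hall : ∀ f ∈ fs, f.length ≤ mw.length) :
    ((fs.foldl (fun mw frame => frame.zipIdx.foldl (fun mw p =>
        mw.set p.2 (Nat.max (mw.getD p.2 0) p.1.toList.length)) mw) mw).getD i 0) =
      fs.foldl (fun a f => Nat.max a (f.getD i "").toList.length) (mw.getD i 0) := by
  induction fs generalizing mw with
  | nil => rfl
  | cons f rest ih =>
    rw [List.foldl_cons, List.foldl_cons,
        ih _ (fun g hg => by
          rw [widths_inner_len]; exact hall g (List.mem_cons_of_mem _ hg))]
    congr 1
    rw [widths_inner_getD f i 0 mw (by simpa using hall f List.mem_cons_self)]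
    by_cases hif : i < f.length
    · simp [hif]
    · simp [hif]

-- every frame length is bounded by the computed max height
theorem len_le_maxH (fs : List (List String)) (f : List String) (hf : f ∈ fs) :
    f.length ≤ ((fs.map List.length).max?).getD 0 :=
  List.le_max?_getD_of_mem (List.mem_map_of_mem hf)

theorem a_eq_spec (fs : List (List String)) (h : fs ≠ []) :
    normalize_sprite_frames_py fs = specOut fs := by
  simp only [normalize_sprite_frames_py, specOut, if_neg h]
  rw [foldl_append_map, List.nil_append]
  apply List.map_congr_left
  intro f hf
  rw [foldl_append_map, List.nil_append]
  apply List.map_congr_left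
  intro i _
  congr 1
  · exact cell_eq f i
  · rw [widths_outer fs i _ (fun g hg => by
        rw [List.length_replicate]; exact len_le_maxH fs g hg)]
    have : (List.replicate (((fs.map List.length).max?).getD 0) (0:Nat)).getD i 0 = 0 := by
      simp [List.getD, List.getElem?_replicate]
      split <;> rfl
    rw [this]; rfl

-- nonempty Nat maxima: max?.getD 0 is the max fold from 0
theorem maxD_eq_foldl (l : List Nat) : l.max?.getD 0 = l.foldl Nat.max 0 := by
  cases l with
  | nil => rfl
  | cons a as => simp [List.max?]

-- B's per-row inline width equals the per-index max fold
theorem row_width_eq (fs : List (List String)) (i : Nat) :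
    (((fs.map (fun f => if i < f.length then f.getD i "" else "")).map
        (fun c => c.toList.length)).max?).getD 0 = specW fs i := by
  rw [maxD_eq_foldl, List.foldl_map, List.foldl_map, specW]
  apply PySem.List.foldl_congr_mem
  intro a g _
  rw [cell_eq g i]

theorem b_eq_spec (fs : List (List String)) (h : fs ≠ []) :
    normalize_sprite_frames_py_alt fs = specOut fs := by
  simp only [normalize_sprite_frames_py_alt, specOut, if_neg h]
  set H : Nat := ((fs.map List.length).max?).getD 0 with hH
  apply List.ext_getElem
  · simp
  · intro j h1 h2
    have hj : j < fs.length := by simpa using h1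
    simp only [List.getElem_map, List.getElem_range]
    apply List.map_congr_left
    intro i hi
    have hiH : i < H := List.mem_range.mp hi
    -- evaluate rows.getD i []
    have hrow : ∀ (g : Nat → List String),
        (((List.range H).map g).getD i []) = g i := fun g => by
      rw [List.getD_eq_getElem _ _ (by simpa using hiH)]
      simp
    rw [hrow]
    -- evaluate the j-th cell of the i-th row
    rw [List.getD_eq_getElem _ _ (by simpa using hj)]
    simp only [List.getElem_map]
    rw [cell_eq fs[j] i, row_width_eq fs i]
    rfl

-- ===== VERDICT (by name: the statement is the Claim_ definition above) =====
theorem normalize_sprite_frames_py_spec : Claim_equal_normalize_sprite_frames_py := by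
  intro fs _
  unfold Spec_normalize_sprite_frames_py
  by_cases h : fs = []
  · subst h; rfl
  · rw [a_eq_spec fs h, b_eq_spec fs h]
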